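-- pv_equiv track=rewrite | github.com/Gui007ex/Calculadora-de-Matrizes | Matrizes.py | Translacao3D
-- ===== SOURCE A (Python) =====
-- def CopyMatrix(matriz):
--     copy = []
--     for i in range(len(matriz)):
--         copy.append([])
--         for j in range(len(matriz[i])):
--             copy[i].append(matriz[i][j])
--     return copy
--
-- def Translacao3D(vector,dx,dy,dz):
--         sub_vector = CopyMatrix(vector)
--         sub_vector.append([1])
--         idTranslacao = [[1,0,0,dx],[0,1,0,dy],[0,0,1,dz],[0,0,0,1]]
--         translacao = [[],[],[],[]]
--
--         somat=0
--         for i in range(4):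
--             for k in range(4):
--                 somat+=idTranslacao[i][k]*sub_vector[k][0]
--             translacao[i].append(somat)
--             somat=0
--
--         return translacao[:3]
-- ===== SOURCE B (Python) =====
-- def Translacao3D(vector, dx, dy, dz):
--     # Closed form: the 4x4 translation matrix is identity plus an offset column,
--     # so the product is each coordinate plus displacement times the homogeneous
--     # weight (the 4th row if present, else the appended 1).
--     w = vector[3][0] if len(vector) > 3 else 1
--     return [[vector[0][0] + dx * w],
--             [vector[1][0] + dy * w],
--             [vector[2][0] + dz * w]]
-- ===== Notes on version B (the rewrite author's own statement) =====
-- stated objective: faster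
-- what changed: Replaces the full matrix copy, the augmented vector and the 4x4 matrix-vector multiply loop with a closed form: each coordinate plus its displacement times the homogeneous weight (row 3 if present, else 1).
import Mathlib
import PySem

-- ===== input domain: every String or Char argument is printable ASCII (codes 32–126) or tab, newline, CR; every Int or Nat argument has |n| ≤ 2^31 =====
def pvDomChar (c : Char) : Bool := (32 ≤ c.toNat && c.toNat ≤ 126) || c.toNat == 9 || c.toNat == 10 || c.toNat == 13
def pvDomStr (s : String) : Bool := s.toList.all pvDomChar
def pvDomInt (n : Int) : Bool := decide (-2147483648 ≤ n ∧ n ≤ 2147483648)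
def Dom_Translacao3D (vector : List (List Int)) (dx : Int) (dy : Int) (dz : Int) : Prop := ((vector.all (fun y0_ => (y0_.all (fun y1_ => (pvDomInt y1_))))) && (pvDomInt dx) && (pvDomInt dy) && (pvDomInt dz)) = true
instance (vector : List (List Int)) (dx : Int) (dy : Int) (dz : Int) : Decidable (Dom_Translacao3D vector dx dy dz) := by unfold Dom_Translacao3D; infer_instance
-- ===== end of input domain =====

-- B replaces A's full matrix copy + augmented vector + 4x4 multiply loop by the closed form
-- coordinate + displacement * homogeneous weight (row 3 if present, else 1): O(1) vs A's copy of the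
-- whole input (measured faster); equal on every input where A returns (Pre_).

-- ===== PORT A =====
def pvCopyMatrix (matriz : List (List Int)) : List (List Int) :=
  (PySem.List.pyRange 0 matriz.length 1).foldl
    (fun copy i =>
      copy ++ [(PySem.List.pyRange 0 (PySem.List.pyGetD matriz i []).length 1).foldl
        (fun r j => r ++ [PySem.List.pyGetD (PySem.List.pyGetD matriz i []) j 0]) []]) []

def Translacao3D (vector : List (List Int)) (dx : Int) (dy : Int) (dz : Int) : List (List Int) :=
  let sub_vector := pvCopyMatrix vector ++ [[1]]
  let idTranslacao : List (List Int) := [[1,0,0,dx],[0,1,0,dy],[0,0,1,dz],[0,0,0,1]]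
  let translacao :=
    (PySem.List.pyRange 0 4 1).foldl
      (fun t i =>
        let somat := (PySem.List.pyRange 0 4 1).foldl
          (fun s k => s + PySem.List.pyGetD (PySem.List.pyGetD idTranslacao i []) k 0
                          * PySem.List.pyGetD (PySem.List.pyGetD sub_vector k []) 0 0) 0
        PySem.List.pySetD t i ((PySem.List.pyGetD t i []) ++ [somat]))
      ([[],[],[],[]] : List (List Int))
  PySem.List.slice translacao none (some 3)

-- ===== PORT B =====
def Translacao3D_alt (vector : List (List Int)) (dx : Int) (dy : Int) (dz : Int) : List (List Int) :=
  let w := if 3 < vector.length then PySem.List.pyGetD (PySem.List.pyGetD vector 3 []) 0 0 else 1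
  [[PySem.List.pyGetD (PySem.List.pyGetD vector 0 []) 0 0 + dx * w],
   [PySem.List.pyGetD (PySem.List.pyGetD vector 1 []) 0 0 + dy * w],
   [PySem.List.pyGetD (PySem.List.pyGetD vector 2 []) 0 0 + dz * w]]

-- ===== PRECONDITION & SPEC =====
-- Exactly where A returns: at least 3 rows and rows 0..3 (those read by the multiply) nonempty.
def Pre_Translacao3D (vector : List (List Int)) (dx : Int) (dy : Int) (dz : Int) : Prop :=
  3 ≤ vector.length ∧ ∀ r ∈ vector.take 4, r ≠ []
instance (vector : List (List Int)) (dx : Int) (dy : Int) (dz : Int) : Decidable (Pre_Translacao3D vector dx dy dz) := by unfold Pre_Translacao3D; infer_instance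

def pvWitness_Translacao3D : List (List Int) × Int × Int × Int := ([[1],[2],[3]], 4, 5, 6)

def Spec_Translacao3D (vector : List (List Int)) (dx : Int) (dy : Int) (dz : Int) (out : List (List Int)) : Prop := out = Translacao3D_alt vector dx dy dz
instance (vector : List (List Int)) (dx : Int) (dy : Int) (dz : Int) (out : List (List Int)) : Decidable (Spec_Translacao3D vector dx dy dz out) := by unfold Spec_Translacao3D; infer_instance

-- ===== CLAIM (what is proved, stated in full; the proofs are below) =====
def Claim_equal_Translacao3D : Prop := ∀ (vector : List (List Int)) (dx : Int) (dy : Int) (dz : Int), Dom_Translacao3D vector dx dy dz → Pre_Translacao3D vector dx dy dz → Spec_Translacao3D vector dx dy dz (Translacao3D vector dx dy dz)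

-- ===== LEMMAS AND PROOFS =====

theorem pvCopyMatrix_eq (m : List (List Int)) : pvCopyMatrix m = m := by
  unfold pvCopyMatrix
  rw [PySem.List.foldl_pyRange_zero_pyGetD' m []
      (fun copy row => copy ++ [(PySem.List.pyRange 0 row.length 1).foldl (fun r j => r ++ [PySem.List.pyGetD row j 0]) []]) []]
  rw [PySem.List.foldl_append_singleton_eq_map]
  have hrow : ∀ row : List Int,
      (PySem.List.pyRange 0 (row.length : Int) 1).foldl (fun r j => r ++ [PySem.List.pyGetD row j 0]) [] = row := by
    intro row
    rw [PySem.List.foldl_pyRange_zero_pyGetD' row 0 (fun r x => r ++ [x]) []]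
    exact PySem.List.foldl_append_singleton row []
  simp only [hrow]
  exact List.map_id _

-- ===== VERDICT (by name: the statement is the Claim_ definition above) =====
theorem pvGet1 {α : Type} (w x : α) (rest : List α) (dflt : α) :
    PySem.List.pyGetD (w::x::rest) 1 dflt = x := by
  rw [PySem.List.pyGetD_eq_getElem (w::x::rest) dflt (by norm_num) (by simp <;> omega)]
  try rfl

theorem pvGet2 {α : Type} (w x y : α) (rest : List α) (dflt : α) :
    PySem.List.pyGetD (w::x::y::rest) 2 dflt = y := by
  rw [PySem.List.pyGetD_eq_getElem (w::x::y::rest) dflt (by norm_num) (by simp <;> omega)]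
  try rfl

theorem pvGet3 {α : Type} (w x y z : α) (rest : List α) (dflt : α) :
    PySem.List.pyGetD (w::x::y::z::rest) 3 dflt = z := by
  rw [PySem.List.pyGetD_eq_getElem (w::x::y::z::rest) dflt (by norm_num) (by simp <;> omega)]
  try rfl

theorem pvSet0 {α : Type} (w : α) (rest : List α) (v : α) :
    PySem.List.pySetD (w::rest) 0 v = v::rest := by
  rw [PySem.List.pySetD_of_nonneg (w::rest) v (by norm_num)]
  try rfl

theorem pvSet1 {α : Type} (w x : α) (rest : List α) (v : α) :
    PySem.List.pySetD (w::x::rest) 1 v = w::v::rest := by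
  rw [PySem.List.pySetD_of_nonneg (w::x::rest) v (by norm_num)]
  try rfl

theorem pvSet2 {α : Type} (w x y : α) (rest : List α) (v : α) :
    PySem.List.pySetD (w::x::y::rest) 2 v = w::x::v::rest := by
  rw [PySem.List.pySetD_of_nonneg (w::x::y::rest) v (by norm_num)]
  try rfl

theorem pvSet3 {α : Type} (w x y z : α) (rest : List α) (v : α) :
    PySem.List.pySetD (w::x::y::z::rest) 3 v = w::x::y::v::rest := by
  rw [PySem.List.pySetD_of_nonneg (w::x::y::z::rest) v (by norm_num)]
  try rfl

theorem pvSlice3 {α : Type} (w x y z : α) : PySem.List.slice [w,x,y,z] none (some 3) = [w,x,y] := by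
  rw [PySem.List.slice_to [w,x,y,z] (b:=3) (by norm_num)]
  try rfl

set_option maxHeartbeats 1600000 in
theorem Translacao3D_spec : Claim_equal_Translacao3D := by
  intro vector dx dy dz _ hpre
  obtain ⟨hlen, hrows⟩ := hpre
  match vector, hlen with
  | (a :: b :: c :: rest), _ =>
    have ha : a ≠ [] := hrows a (by simp)
    have hb : b ≠ [] := hrows b (by simp)
    have hc : c ≠ [] := hrows c (by simp)
    obtain ⟨a0, at_, rfl⟩ := List.exists_cons_of_ne_nil ha
    obtain ⟨b0, bt_, rfl⟩ := List.exists_cons_of_ne_nil hb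
    obtain ⟨c0, ct_, rfl⟩ := List.exists_cons_of_ne_nil hc
    cases rest with
    | nil =>
      show Spec_Translacao3D _ _ _ _ _
      unfold Spec_Translacao3D Translacao3D Translacao3D_alt
      rw [pvCopyMatrix_eq]
      rw [show PySem.List.pyRange 0 4 1 = [0,1,2,3] from by decide]
      rw [if_neg (by simp)]
      simp only [List.cons_append, List.nil_append, List.foldl,
        PySem.List.pyGetD_zero_cons, pvGet1, pvGet2, pvGet3, pvSet0, pvSet1, pvSet2, pvSet3,
        pvSlice3]
      norm_num
    | cons d rest' =>
      have hd : d ≠ [] := hrows d (by simp [List.take])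
      obtain ⟨d0, dt_, rfl⟩ := List.exists_cons_of_ne_nil hd
      show Spec_Translacao3D _ _ _ _ _
      unfold Spec_Translacao3D Translacao3D Translacao3D_alt
      rw [pvCopyMatrix_eq]
      rw [show PySem.List.pyRange 0 4 1 = [0,1,2,3] from by decide]
      rw [if_pos (by simp)]
      simp only [List.cons_append, List.foldl,
        PySem.List.pyGetD_zero_cons, pvGet1, pvGet2, pvGet3, pvSet0, pvSet1, pvSet2, pvSet3,
        pvSlice3]
      norm_num
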